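-- pv_equiv track=rewrite | github.com/danphenderson/fast-julia | figures.py | preferred_variant_order
-- ===== SOURCE A (Python) =====
-- from typing import Iterable, Literal
--
-- def preferred_variant_order(present: Iterable[str]) -> list[str]:
--     preferred = [
--         "rossler_naive",
--         "rossler",
--         "rossler_naive!",
--         "rossler!",
--         "rossler_static_naive",
--         "rossler_static",
--         "rossler_type_stable",
--         "rossler_ad",
--     ]
--     present_set = set(map(str, present))
--     ordered: list[str] = [v for v in preferred if v in present_set]
--     # add any other variants deterministically
--     for v in sorted(present_set):
--         if v not in ordered:
--             ordered.append(v)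
--     return ordered
-- ===== SOURCE B (Python) =====
-- def preferred_variant_order(present):
--     preferred = [
--         "rossler_naive",
--         "rossler",
--         "rossler_naive!",
--         "rossler!",
--         "rossler_static_naive",
--         "rossler_static",
--         "rossler_type_stable",
--         "rossler_ad",
--     ]
--     rank = {name: i for i, name in enumerate(preferred)}
--     return sorted(set(map(str, present)), key=lambda v: (rank.get(v, len(preferred)), v))
-- ===== Notes on version B (the rewrite author's own statement) =====
-- stated objective: faster
-- what changed: Replaces the two-pass filter-preferred-then-append-sorted-rest structure (whose 'v not in ordered' list scan is quadratic) with a single sort of the deduplicated input under a composite key (rank in the preferred list with fallback rank, then name).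
import Mathlib
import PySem

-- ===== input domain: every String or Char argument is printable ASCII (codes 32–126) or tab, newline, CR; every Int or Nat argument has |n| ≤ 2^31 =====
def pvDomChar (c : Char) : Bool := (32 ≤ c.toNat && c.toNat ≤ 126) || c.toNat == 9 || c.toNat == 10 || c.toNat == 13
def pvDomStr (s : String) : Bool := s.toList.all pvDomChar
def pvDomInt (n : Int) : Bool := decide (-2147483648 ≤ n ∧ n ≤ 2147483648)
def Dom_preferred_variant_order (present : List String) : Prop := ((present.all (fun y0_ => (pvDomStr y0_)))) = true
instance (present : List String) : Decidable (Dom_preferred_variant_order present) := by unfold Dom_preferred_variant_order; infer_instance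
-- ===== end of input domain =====

-- B replaces A's two-pass structure (filter the preferred list, then append the sorted leftovers,
-- rescanning the growing 'ordered' list for each) with one sort of the deduplicated input under the
-- composite key (rank in the preferred list with fallback rank len(preferred), then the name itself);
-- objective: faster (measured) and simpler.

-- ===== PORT A =====
def preferred_variant_order (present : List String) : List String :=
  let preferred : List String :=
    ["rossler_naive", "rossler", "rossler_naive!", "rossler!",
     "rossler_static_naive", "rossler_static", "rossler_type_stable", "rossler_ad"]
  let present_set : PySem.Set String := PySem.Set.ofList (present.map (fun v => v))
  let ordered : List String := preferred.filter (fun v => PySem.Set.contains present_set v)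
  (PySem.List.sorted present_set (fun v => v) false).foldl
    (fun ordered v => if ordered.contains v then ordered else ordered ++ [v]) ordered

-- ===== PORT B =====
def preferred_variant_order_alt (present : List String) : List String :=
  let preferred : List String :=
    ["rossler_naive", "rossler", "rossler_naive!", "rossler!",
     "rossler_static_naive", "rossler_static", "rossler_type_stable", "rossler_ad"]
  let rank : PySem.Dict String Int :=
    (PySem.List.enumerate preferred 0).foldl
      (fun d p => PySem.Dict.insert d p.2 p.1) PySem.Dict.empty
  PySem.List.sorted2 (PySem.Set.ofList (present.map (fun v => v)))
    (fun v => PySem.Dict.getD rank v (preferred.length : Int)) (fun v => v) false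

-- ===== PRECONDITION & SPEC =====
def Spec_preferred_variant_order (present : List String) (out : List String) : Prop := out = preferred_variant_order_alt present
instance (present : List String) (out : List String) : Decidable (Spec_preferred_variant_order present out) := by unfold Spec_preferred_variant_order; infer_instance

-- ===== CLAIM (what is proved, stated in full; the proofs are below) =====
def Claim_equal_preferred_variant_order : Prop := ∀ (present : List String), Dom_preferred_variant_order present → Spec_preferred_variant_order present (preferred_variant_order present)

-- ===== LEMMAS AND PROOFS =====

-- the preferred list and B's rank function, named for the proofs
def pvP : List String :=
  ["rossler_naive", "rossler", "rossler_naive!", "rossler!",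
   "rossler_static_naive", "rossler_static", "rossler_type_stable", "rossler_ad"]

def pvRankD : PySem.Dict String Int :=
  (PySem.List.enumerate pvP 0).foldl
    (fun d p => PySem.Dict.insert d p.2 p.1) PySem.Dict.empty

def pvRk (v : String) : Int := PySem.Dict.getD pvRankD v 8

lemma pvP_pairwise : pvP.Pairwise (fun a b => pvRk a < pvRk b) := by decide

lemma pvRk_lt_of_mem {a : String} (h : a ∈ pvP) : pvRk a < 8 := by
  fin_cases h <;> decide

lemma pvRk_of_not_mem {v : String} (h : v ∉ pvP) : pvRk v = 8 := by
  simp only [pvP, List.mem_cons, not_or] at h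
  obtain ⟨h1, h2, h3, h4, h5, h6, h7, h8, -⟩ := h
  have hitems : pvRankD.items =
      [("rossler_naive", (0 : Int)), ("rossler", 1), ("rossler_naive!", 2), ("rossler!", 3),
       ("rossler_static_naive", 4), ("rossler_static", 5), ("rossler_type_stable", 6),
       ("rossler_ad", 7)] := by decide
  have e1 : ("rossler_naive" == v) = false := by simp [Ne.symm h1]
  have e2 : ("rossler" == v) = false := by simp [Ne.symm h2]
  have e3 : ("rossler_naive!" == v) = false := by simp [Ne.symm h3]
  have e4 : ("rossler!" == v) = false := by simp [Ne.symm h4]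
  have e5 : ("rossler_static_naive" == v) = false := by simp [Ne.symm h5]
  have e6 : ("rossler_static" == v) = false := by simp [Ne.symm h6]
  have e7 : ("rossler_type_stable" == v) = false := by simp [Ne.symm h7]
  have e8 : ("rossler_ad" == v) = false := by simp [Ne.symm h8]
  simp [pvRk, PySem.Dict.getD, PySem.Dict.get?, hitems, List.find?, e1, e2, e3, e4, e5, e6, e7, e8]

-- A's append loop over a duplicate-free list is "append the not-yet-present elements"
lemma pvLoop_eq (xs : List String) (acc : List String) (hnd : xs.Nodup) :
    xs.foldl (fun o v => if o.contains v then o else o ++ [v]) acc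
      = acc ++ xs.filter (fun v => !acc.contains v) := by
  induction xs generalizing acc with
  | nil => simp
  | cons x xs ih =>
    rcases List.nodup_cons.mp hnd with ⟨hx, hnd'⟩
    simp only [List.foldl_cons]
    by_cases hc : x ∈ acc
    · rw [if_pos (by simpa using hc), ih _ hnd', List.filter_cons]
      simp [hc]
    · rw [if_neg (by simpa using hc), ih _ hnd']
      have hcongr : ∀ v ∈ xs, (!(acc ++ [x]).contains v) = (!acc.contains v) := by
        intro v hv
        have hne : v ≠ x := fun he => hx (he ▸ hv)
        simp [hne]
      rw [List.filter_congr hcongr, List.filter_cons]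
      simp [hc, List.append_assoc]

-- the lexicographic tuple key (rank, name) as a single sort key
lemma pvBefore_eq (k : String → Int) (a b : String) :
    (decide (k a < k b) || (!decide (k b < k a) && decide (a < b)))
      = decide (toLex (k a, a) < toLex (k b, b)) := by
  rcases lt_trichotomy (k a) (k b) with h | h | h
  · simp [Prod.Lex.lt_iff, h, asymm h]
  · simp [Prod.Lex.lt_iff, h]
  · simp [Prod.Lex.lt_iff, asymm h, h, ne_of_gt h]

lemma pvSorted2_eq (xs : List String) (k : String → Int) :
    PySem.List.sorted2 xs k (fun v => v) false
      = PySem.List.sorted xs (fun v => toLex (k v, v)) false := by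
  simp only [PySem.List.sorted2, PySem.List.sorted]
  have h : (fun a b : String => decide (k a < k b) || (!decide (k b < k a) && decide (a < b)))
      = fun a b : String => decide (toLex (k a, a) < toLex (k b, b)) := by
    funext a b; exact pvBefore_eq k a b
  rw [h]; simp

-- the two ports agree on every input
lemma pvMain (present : List String) :
    preferred_variant_order present = preferred_variant_order_alt present := by
  have hA : preferred_variant_order present
      = (PySem.List.sorted (PySem.Set.ofList (present.map (fun v => v))) (fun v => v) false).foldl
          (fun o v => if o.contains v then o else o ++ [v])
          (pvP.filter (fun v =>
            PySem.Set.contains (PySem.Set.ofList (present.map (fun v => v))) v)) := rfl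
  have hB : preferred_variant_order_alt present
      = PySem.List.sorted2 (PySem.Set.ofList (present.map (fun v => v))) pvRk (fun v => v) false := rfl
  set s : List String := PySem.Set.ofList (present.map (fun v => v)) with hs
  set o0 : List String := pvP.filter (fun v => PySem.Set.contains s v) with ho0
  set xs : List String := PySem.List.sorted s (fun v => v) false with hxs
  have hnds : s.Nodup := PySem.Set.nodup_ofList _
  have hndxs : xs.Nodup := ((PySem.List.sorted_perm s (fun v => v) false).nodup_iff).mpr hnds
  rw [hA, hB, pvSorted2_eq, pvLoop_eq xs o0 hndxs]
  set key : String → Lex (Int × String) := fun v => toLex (pvRk v, v) with hkey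
  -- membership bookkeeping
  have hsubo0 : ∀ a, a ∈ o0 → a ∈ pvP ∧ a ∈ s := by
    intro a ha
    rcases List.mem_filter.mp ha with ⟨h1, h2⟩
    exact ⟨h1, by simpa [PySem.Set.contains, List.elem_iff] using h2⟩
  have hmemfil : ∀ a, a ∈ xs.filter (fun v => !o0.contains v) → a ∈ s ∧ a ∉ pvP := by
    intro a ha
    rcases List.mem_filter.mp ha with ⟨h1, h2⟩
    have has : a ∈ s := (PySem.List.mem_sorted _ _ _ _).mp h1
    have hno : a ∉ o0 := by simpa using h2
    refine ⟨has, fun hP => hno ?_⟩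
    exact List.mem_filter.mpr ⟨hP, (by simpa [PySem.Set.contains, List.elem_iff] using has : PySem.Set.contains s a = true)⟩
  -- the left-hand side is a permutation of s
  have hperm : (o0 ++ xs.filter (fun v => !o0.contains v)).Perm s := by
    have hnd1 : o0.Nodup := (by decide : pvP.Nodup).filter _
    have hnd2 : (xs.filter (fun v => !o0.contains v)).Nodup := hndxs.filter _
    have hdisj : o0.Disjoint (xs.filter (fun v => !o0.contains v)) := by
      intro a ha hb
      rcases List.mem_filter.mp hb with ⟨-, h2⟩
      exact (by simpa using h2 : a ∉ o0) ha
    refine (List.perm_ext_iff_of_nodup (hnd1.append hnd2 hdisj) hnds).mpr ?_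
    intro a
    constructor
    · intro ha
      rcases List.mem_append.mp ha with h | h
      · exact (hsubo0 a h).2
      · exact (hmemfil a h).1
    · intro ha
      by_cases hin : a ∈ o0
      · exact List.mem_append.mpr (Or.inl hin)
      · refine List.mem_append.mpr (Or.inr ?_)
        exact List.mem_filter.mpr ⟨(PySem.List.mem_sorted _ _ _ _).mpr ha, by simpa using hin⟩
  -- and it is strictly increasing under the composite key
  have hpw : (o0 ++ xs.filter (fun v => !o0.contains v)).Pairwise
      (fun a b => key a < key b) := by
    refine List.pairwise_append.mpr ⟨?_, ?_, ?_⟩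
    · exact (pvP_pairwise.filter _).imp (fun h => Prod.Lex.lt_iff.mpr (Or.inl h))
    · have h0 : (xs.filter (fun v => !o0.contains v)).Pairwise (· < ·) :=
        (PySem.List.sorted_ofList_pairwise_lt _).filter _
      refine h0.imp_of_mem ?_
      intro a b ha hb hab
      have h8a := pvRk_of_not_mem (hmemfil a ha).2
      have h8b := pvRk_of_not_mem (hmemfil b hb).2
      exact Prod.Lex.lt_iff.mpr (Or.inr ⟨by simp [hkey, h8a, h8b], hab⟩)
    · intro a ha b hb
      have hlt : pvRk a < 8 := pvRk_lt_of_mem (hsubo0 a ha).1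
      have h8b := pvRk_of_not_mem (hmemfil b hb).2
      exact Prod.Lex.lt_iff.mpr (Or.inl (by simp only [hkey]; show pvRk a < pvRk b; rw [h8b]; exact hlt))
  exact (PySem.List.sorted_eq_of_perm_of_pairwise_lt _ _ key hperm hpw).symm

-- ===== VERDICT (by name: the statement is the Claim_ definition above) =====
theorem preferred_variant_order_spec : Claim_equal_preferred_variant_order := by
  intro present _
  exact pvMain present
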